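-- pv_equiv track=rewrite | github.com/harshitpoddar09/HackerRank-Solutions | Python/Piling Up!.py | piling
-- ===== SOURCE A (Python) =====
-- def piling(block):
--     stack=[]
--     while block:
--         if block[-1]>block[0]:
--             stack.append(block[-1])
--             block.pop()
--         else:
--             stack.append(block[0])
--             block.pop(0)
--         if len(stack)>=2:
--             if stack[-1]>stack[-2]:
--                 return 'No'
--     return 'Yes'
-- ===== SOURCE B (Python) =====
-- def piling(block):
--     i, j = 0, len(block) - 1
--     last = None
--     while i <= j:
--         if block[j] > block[i]:
--             x = block[j]
--             j -= 1
--         else: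
--             x = block[i]
--             i += 1
--         if last is not None and x > last:
--             return 'No'
--         last = x
--     return 'Yes'
-- ===== Notes on version B (the rewrite author's own statement) =====
-- stated objective: faster
-- what changed: Replaces A's destructive loop that pops elements off a shrinking list (pop(0) is O(n)) and grows an explicit stack with a two-pointer scan over the unchanged list that tracks only the last placed value.
import Mathlib
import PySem

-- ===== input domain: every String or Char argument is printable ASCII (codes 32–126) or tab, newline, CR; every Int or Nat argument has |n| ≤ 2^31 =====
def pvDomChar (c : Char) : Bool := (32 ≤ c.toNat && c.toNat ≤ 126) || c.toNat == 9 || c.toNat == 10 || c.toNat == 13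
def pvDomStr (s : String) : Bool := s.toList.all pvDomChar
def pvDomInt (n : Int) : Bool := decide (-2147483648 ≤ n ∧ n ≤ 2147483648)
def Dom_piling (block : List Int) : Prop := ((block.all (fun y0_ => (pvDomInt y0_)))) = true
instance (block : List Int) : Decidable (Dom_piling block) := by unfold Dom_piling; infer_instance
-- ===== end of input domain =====

-- B replaces A's quadratic list mutation (pop(0) on every head pick) with a linear two-pointer
-- scan that only tracks the last placed value. Equivalence is about the RETURN value only:
-- Python A empties its argument list in place, B does not mutate it.

-- ===== PORT A =====
-- A's while loop: `block` shrinks from either end, `stack` grows; after each append,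
-- if len(stack) >= 2 and stack[-1] > stack[-2], return 'No'.
def pilingLoop (block stack : List Int) : String :=
  match block with
  | [] => "Yes"
  | b0 :: bt =>
    if ((b0 :: bt).getLast (by simp)) > b0 then
      -- stack.append(block[-1]); block.pop(); stack2 is the updated stack
      if 2 ≤ (stack ++ [(b0 :: bt).getLast (by simp)]).length then
        if ((PySem.List.pyGet? (stack ++ [(b0 :: bt).getLast (by simp)]) (-1)).getD 0) > ((PySem.List.pyGet? (stack ++ [(b0 :: bt).getLast (by simp)]) (-2)).getD 0) then "No"
        else pilingLoop ((b0 :: bt).dropLast) (stack ++ [(b0 :: bt).getLast (by simp)])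
      else pilingLoop ((b0 :: bt).dropLast) (stack ++ [(b0 :: bt).getLast (by simp)])
    else
      -- stack.append(block[0]); block.pop(0)
      if 2 ≤ (stack ++ [b0]).length then
        if ((PySem.List.pyGet? (stack ++ [b0]) (-1)).getD 0) > ((PySem.List.pyGet? (stack ++ [b0]) (-2)).getD 0) then "No"
        else pilingLoop bt (stack ++ [b0])
      else pilingLoop bt (stack ++ [b0])
  termination_by block.length
  decreasing_by all_goals simp [List.length_dropLast]

def piling (block : List Int) : String := pilingLoop block []

-- ===== PORT B =====
-- Source B's while loop: two pointers i ≤ j into the unchanged list, `last` the last placed value.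
-- Indices i, j are always in range here (0 ≤ i ≤ j < len), so the `.getD 0` default is never used.
def pilingAltLoop (block : List Int) (i j : Int) (last : Option Int) : String :=
  if _h : i ≤ j then
    if ((PySem.List.pyGet? block j).getD 0) > ((PySem.List.pyGet? block i).getD 0) then
      let x := (PySem.List.pyGet? block j).getD 0
      match last with
      | some l => if x > l then "No" else pilingAltLoop block i (j - 1) (some x)
      | none => pilingAltLoop block i (j - 1) (some x)
    else
      let x := (PySem.List.pyGet? block i).getD 0
      match last with
      | some l => if x > l then "No" else pilingAltLoop block (i + 1) j (some x)
      | none => pilingAltLoop block (i + 1) j (some x)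
  else "Yes"
  termination_by (j + 1 - i).toNat
  decreasing_by all_goals omega

def piling_alt (block : List Int) : String :=
  pilingAltLoop block 0 ((block.length : Int) - 1) none

-- ===== PRECONDITION & SPEC =====
def Spec_piling (block : List Int) (out : String) : Prop := out = piling_alt block
instance (block : List Int) (out : String) : Decidable (Spec_piling block out) := by unfold Spec_piling; infer_instance

-- ===== CLAIM (what is proved, stated in full; the proofs are below) =====
def Claim_equal_piling : Prop := ∀ (block : List Int), Dom_piling block → Spec_piling block (piling block)

-- ===== LEMMAS AND PROOFS =====

-- Common abstraction of both loops: consume the list from whichever end is larger,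
-- remembering only the last value placed.
def gLoop (b : List Int) (last : Option Int) : String :=
  match b with
  | [] => "Yes"
  | b0 :: bt =>
    if ((b0 :: bt).getLast (by simp)) > b0 then
      match last with
      | some l => if ((b0 :: bt).getLast (by simp)) > l then "No"
                  else gLoop ((b0 :: bt).dropLast) (some ((b0 :: bt).getLast (by simp)))
      | none => gLoop ((b0 :: bt).dropLast) (some ((b0 :: bt).getLast (by simp)))
    else
      match last with
      | some l => if b0 > l then "No" else gLoop bt (some b0)
      | none => gLoop bt (some b0)
  termination_by b.length
  decreasing_by all_goals simp [List.length_dropLast]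

theorem pyGet_append_neg_one (s : List Int) (x : Int) :
    (PySem.List.pyGet? (s ++ [x]) (-1)).getD 0 = x := by
  simp [PySem.List.pyGet?_neg_one_append_singleton]

theorem pyGet_append_neg_two (s : List Int) (x l : Int) (h : s.getLast? = some l) :
    (PySem.List.pyGet? (s ++ [x]) (-2)).getD 0 = l := by
  have hs : s ≠ [] := by rintro rfl; simp at h
  have hpos : 0 < s.length := List.length_pos_iff.mpr hs
  rw [PySem.List.pyGet?_neg_ofNat (s ++ [x]) 2 (by omega) (by simp only [List.length_append, List.length_cons, List.length_nil]; omega)]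
  have hl : (s ++ [x]).length - 2 = s.length - 1 := by simp only [List.length_append, List.length_cons, List.length_nil]; omega
  have hlt : s.length - 1 < s.length := by omega
  rw [hl, List.getElem?_append_left hlt, ← List.getLast?_eq_getElem?, h]
  rfl

-- A's loop only ever reads the last element of its stack: it equals gLoop.
theorem pilingLoop_eq_gLoop : ∀ (n : Nat) (b stack : List Int), b.length ≤ n →
    pilingLoop b stack = gLoop b stack.getLast? := by
  intro n
  induction n with
  | zero =>
    intro b stack hb
    have hbnil : b = [] := List.eq_nil_of_length_eq_zero (Nat.le_zero.mp hb)
    subst hbnil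
    rw [pilingLoop.eq_def, gLoop.eq_def]
  | succ n ih =>
    intro b stack hb
    cases b with
    | nil => rw [pilingLoop.eq_def, gLoop.eq_def]
    | cons b0 bt =>
      have hbt : bt.length ≤ n := by simp at hb; omega
      have hdl : (b0 :: bt).dropLast.length ≤ n := by
        simp [List.length_dropLast]; omega
      cases hst : stack.getLast? with
      | none =>
        have hstack : stack = [] := List.getLast?_eq_none_iff.mp hst
        subst hstack
        rw [pilingLoop, gLoop]
        split
        next hc =>
          simp only [List.nil_append, List.length_cons, List.length_nil]
          rw [if_neg (by omega), ih _ _ hdl]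
          simp
        next hc =>
          simp only [List.nil_append, List.length_cons, List.length_nil]
          rw [if_neg (by omega), ih _ _ hbt]
          simp
      | some l =>
        have hsne : stack ≠ [] := by rintro rfl; simp at hst
        have hpos : 0 < stack.length := List.length_pos_iff.mpr hsne
        rw [pilingLoop, gLoop]
        split
        next hc =>
          rw [if_pos (show 2 ≤ (stack ++ [(b0 :: bt).getLast (by simp)]).length by
            simp only [List.length_append, List.length_cons, List.length_nil]; omega)]
          rw [pyGet_append_neg_one, pyGet_append_neg_two _ _ _ hst]
          split
          · rfl
          · rw [ih _ _ hdl, List.getLast?_concat]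
        next hc =>
          rw [if_pos (show 2 ≤ (stack ++ [b0]).length by
            simp only [List.length_append, List.length_cons, List.length_nil]; omega)]
          rw [pyGet_append_neg_one, pyGet_append_neg_two _ _ _ hst]
          split
          · rfl
          · rw [ih _ _ hbt, List.getLast?_concat]

-- B's two-pointer loop equals gLoop on the segment block[i..j].
theorem altLoop_eq_gLoop : ∀ (n : Nat) (block : List Int) (i j : Int) (last : Option Int),
    0 ≤ i → j < (block.length : Int) → (j + 1 - i).toNat ≤ n →
    pilingAltLoop block i j last = gLoop ((block.drop i.toNat).take (j + 1 - i).toNat) last := by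
  intro n
  induction n with
  | zero =>
    intro block i j last hi hj hn
    rw [pilingAltLoop.eq_def, dif_neg (by omega : ¬ i ≤ j)]
    have h0 : (j + 1 - i).toNat = 0 := by omega
    rw [h0, List.take_zero, gLoop.eq_def]
  | succ n ih =>
    intro block i j last hi hj hn
    by_cases hij : i ≤ j
    · have hi' : i.toNat < block.length := by omega
      have hj0 : 0 ≤ j := le_trans hi hij
      have hjlt : j.toNat < block.length := by omega
      have hdrop : block.drop i.toNat = block[i.toNat] :: block.drop (i.toNat + 1) :=
        List.drop_eq_getElem_cons hi'
      have hm : (j + 1 - i).toNat = (j - i).toNat + 1 := by omega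
      have hseg : (block.drop i.toNat).take (j + 1 - i).toNat
          = block[i.toNat] :: (block.drop (i.toNat + 1)).take (j - i).toNat := by
        rw [hm, hdrop, List.take_succ_cons]
      have hlen : ((block.drop i.toNat).take (j + 1 - i).toNat).length = (j + 1 - i).toNat := by
        simp only [List.length_take, List.length_drop]; omega
      have hlast? : ((block.drop i.toNat).take (j + 1 - i).toNat).getLast? = some (block[j.toNat]) := by
        rw [List.getLast?_eq_getElem?, hlen, List.getElem?_take_of_lt (by omega), List.getElem?_drop]
        have hidx : i.toNat + ((j + 1 - i).toNat - 1) = j.toNat := by omega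
        rw [hidx, List.getElem?_eq_getElem hjlt]
      have hdl : (block[i.toNat] :: (block.drop (i.toNat + 1)).take (j - i).toNat).dropLast
          = (block.drop i.toNat).take ((j - 1) + 1 - i).toNat := by
        rw [← hseg, List.dropLast_eq_take, List.take_take, hlen]
        congr 1
        omega
      have hrest : (block.drop (i.toNat + 1)).take (j - i).toNat
          = (block.drop (i + 1).toNat).take (j + 1 - (i + 1)).toNat := by
        have h1 : (i + 1).toNat = i.toNat + 1 := by omega
        have h2 : (j + 1 - (i + 1)).toNat = (j - i).toNat := by omega
        rw [h1, h2]
      rw [hseg] at hlast?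
      have hlastv : ∀ (h : block[i.toNat] :: (block.drop (i.toNat + 1)).take (j - i).toNat ≠ []),
          (block[i.toNat] :: (block.drop (i.toNat + 1)).take (j - i).toNat).getLast h
            = block[j.toNat] := by
        intro h
        have h2 := List.getLast?_eq_some_getLast h
        rw [hlast?] at h2
        exact (Option.some.inj h2).symm
      cases last with
      | none =>
        rw [pilingAltLoop.eq_def, dif_pos hij,
          PySem.List.pyGet?_eq_some_getElem block hj0 hj,
          PySem.List.pyGet?_eq_some_getElem block hi (by omega)]
        simp only [Option.getD_some]
        rw [hseg, gLoop, hlastv]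
        split
        next hcond =>
          rw [hdl]
          exact ih block i (j - 1) _ hi (by omega) (by omega)
        next hcond =>
          rw [hrest]
          exact ih block (i + 1) j _ (by omega) (by omega) (by omega)
      | some l =>
        rw [pilingAltLoop.eq_def, dif_pos hij,
          PySem.List.pyGet?_eq_some_getElem block hj0 hj,
          PySem.List.pyGet?_eq_some_getElem block hi (by omega)]
        simp only [Option.getD_some]
        rw [hseg, gLoop, hlastv]
        split
        next hcond =>
          split
          next => rfl
          next =>
            rw [hdl]
            exact ih block i (j - 1) _ hi (by omega) (by omega)
        next hcond =>
          split
          next => rfl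
          next =>
            rw [hrest]
            exact ih block (i + 1) j _ (by omega) (by omega) (by omega)
    · rw [pilingAltLoop.eq_def, dif_neg hij]
      have h0 : (j + 1 - i).toNat = 0 := by omega
      rw [h0, List.take_zero, gLoop.eq_def]

-- ===== VERDICT (by name: the statement is the Claim_ definition above) =====
theorem piling_spec : Claim_equal_piling := by
  intro block _
  unfold Spec_piling piling piling_alt
  rw [pilingLoop_eq_gLoop block.length block [] le_rfl]
  rcases block with _ | ⟨b0, bt⟩
  · rw [pilingAltLoop]; simp [gLoop]
  · rw [altLoop_eq_gLoop (b0 :: bt).length (b0 :: bt) 0 ((b0 :: bt).length - 1) none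
      le_rfl (by omega) (by omega)]
    have : ((((b0 :: bt).length : Int) - 1 + 1 - 0).toNat) = (b0 :: bt).length := by omega
    simp
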